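-- pv_equiv track=rewrite | github.com/TheJari97/Titanbreaker | tools/update_from_catzee.py | tokenize_kv
-- ===== SOURCE A (Python) =====
-- def strip_comments(text: str) -> str:
--     out = []
--     i = 0
--     in_str = False
--     esc = False
--     while i < len(text):
--         ch = text[i]
--         if in_str:
--             out.append(ch)
--             if esc:
--                 esc = False
--             elif ch == "\\":
--                 esc = True
--             elif ch == '"':
--                 in_str = False
--             i += 1
--             continue
--         if ch == '"':
--             in_str = True
--             out.append(ch)
--             i += 1
--             continue
--         if ch == "/" and i + 1 < len(text) and text[i + 1] == "/":
--             while i < len(text) and text[i] not in "\r\n":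
--                 i += 1
--             continue
--         out.append(ch)
--         i += 1
--     return "".join(out)
--
-- def tokenize_kv(text: str):
--     text = strip_comments(text)
--     tokens = []
--     i = 0
--     while i < len(text):
--         ch = text[i]
--         if ch.isspace():
--             i += 1
--             continue
--         if ch in "{}":
--             tokens.append(ch)
--             i += 1
--             continue
--         if ch == '"':
--             i += 1
--             buf = []
--             esc = False
--             while i < len(text):
--                 ch = text[i]
--                 if esc:
--                     buf.append("\n" if ch == "n" else "\t" if ch == "t" else ch)
--                     esc = False
--                 else:
--                     if ch == "\\":
--                         esc = True
--                     elif ch == '"':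
--                         i += 1
--                         break
--                     else:
--                         buf.append(ch)
--                 i += 1
--             tokens.append("".join(buf))
--             continue
--         j = i
--         while j < len(text) and (not text[j].isspace()) and text[j] not in "{}":
--             j += 1
--         tokens.append(text[i:j])
--         i = j
--     return tokens
-- ===== SOURCE B (Python) =====
-- def tokenize_kv(text: str):
--     # Single-pass lexer: walks the raw text once, tracking the comment-stripper's
--     # string state alongside the tokenizer state, instead of A's two passes.
--     tokens = []
--     n = len(text)
--     i = 0
--     s_in = False      # comment-stripper's "inside a quoted string" state
--     s_esc = False
--     mode = 0          # 0 = top level, 1 = inside quoted token, 2 = inside bareword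
--     buf = []
--     q_esc = False
--     word = []
--     while i < n:
--         ch = text[i]
--         if not s_in and ch == "/" and i + 1 < n and text[i + 1] == "/":
--             while i < n and text[i] not in "\r\n":
--                 i += 1
--             continue
--         # advance the stripper's string state
--         if s_in:
--             if s_esc:
--                 s_esc = False
--             elif ch == "\\":
--                 s_esc = True
--             elif ch == '"':
--                 s_in = False
--         elif ch == '"':
--             s_in = True
--         # feed ch to the tokenizer
--         if mode == 0:
--             if ch in "{}":
--                 tokens.append(ch)
--             elif ch == '"':
--                 mode, buf, q_esc = 1, [], False
--             elif not ch.isspace():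
--                 mode, word = 2, [ch]
--         elif mode == 1:
--             if q_esc:
--                 buf.append("\n" if ch == "n" else "\t" if ch == "t" else ch)
--                 q_esc = False
--             elif ch == "\\":
--                 q_esc = True
--             elif ch == '"':
--                 tokens.append("".join(buf))
--                 mode = 0
--             else:
--                 buf.append(ch)
--         else:
--             if ch.isspace() or ch in "{}":
--                 tokens.append("".join(word))
--                 mode = 0
--                 if ch in "{}":
--                     tokens.append(ch)
--             else:
--                 word.append(ch)
--         i += 1
--     if mode == 1:
--         tokens.append("".join(buf))
--     elif mode == 2:
--         tokens.append("".join(word))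
--     return tokens
-- ===== Notes on version B (the rewrite author's own statement) =====
-- stated objective: alternative
-- what changed: Replaces A's two passes (strip_comments building an intermediate string, then tokenize) with a single-pass lexer over the raw text that tracks the comment-stripper's in-string/escape state alongside the tokenizer state and never materialises the stripped string.
import Mathlib
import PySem

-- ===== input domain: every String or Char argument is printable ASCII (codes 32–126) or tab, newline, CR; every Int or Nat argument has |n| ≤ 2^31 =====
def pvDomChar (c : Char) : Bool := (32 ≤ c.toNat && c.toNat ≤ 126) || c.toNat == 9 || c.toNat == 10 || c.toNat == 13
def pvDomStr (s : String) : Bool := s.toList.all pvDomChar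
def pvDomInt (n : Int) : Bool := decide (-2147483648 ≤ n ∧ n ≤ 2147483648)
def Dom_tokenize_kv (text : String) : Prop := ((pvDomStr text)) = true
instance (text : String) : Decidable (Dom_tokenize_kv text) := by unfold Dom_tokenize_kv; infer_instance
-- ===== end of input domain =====

-- B replaces A's two passes (strip_comments, then tokenize) by a single pass over the
-- raw text that tracks the stripper's string state alongside the tokenizer state
-- (objective: alternative decomposition, same asymptotic cost).

-- ===== PORT A =====

-- `text[i] not in "\r\n"`
def notNL (c : Char) : Bool := !(c == '\r') && !(c == '\n')

-- the while-loop of strip_comments; state (remaining text, in_str, esc), output built by cons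
-- (in the comment branch the inner while starts at the first '/', which is not "\r\n",
--  so it is transcribed as dropWhile over the rest)
def stripGo : List Char → Bool → Bool → List Char
  | [], _, _ => []
  | c :: rest, inStr, esc =>
    if inStr then
      c :: (if esc then stripGo rest true false
            else if c == '\\' then stripGo rest true true
            else if c == '"' then stripGo rest false false
            else stripGo rest true false)
    else if c == '"' then c :: stripGo rest true false
    else if c == '/' && rest.head? == some '/' then
      stripGo (List.dropWhile notNL rest) false false
    else c :: stripGo rest false false
termination_by l _ _ => l.length
decreasing_by
  all_goals first
    | (simpa using Nat.lt_succ_of_le (List.length_dropWhile_le _ _))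
    | simp

-- the inner quoted-string while-loop of tokenize_kv: returns (buf, remaining text)
def readStr : List Char → List Char → Bool → List Char × List Char
  | [], buf, _ => (buf, [])
  | c :: rest, buf, esc =>
    if esc then readStr rest (buf ++ [if c == 'n' then '\n' else if c == 't' then '\t' else c]) false
    else if c == '\\' then readStr rest buf true
    else if c == '"' then (buf, rest)
    else readStr rest (buf ++ [c]) false

theorem readStr_snd_le (l : List Char) : ∀ buf esc, (readStr l buf esc).2.length ≤ l.length := by
  induction l with
  | nil => intro buf esc; simp [readStr]
  | cons c rest ih =>
    intro buf esc
    simp only [readStr]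
    split_ifs <;> simp <;> exact Nat.le_succ_of_le (ih _ _)

-- `(not text[j].isspace()) and text[j] not in "{}"`
def wordChar (c : Char) : Bool := !PySem.Chars.isspace c && !(c == '{') && !(c == '}')

-- the outer while-loop of tokenize_kv (bareword scan j transcribed as takeWhile/dropWhile)
def tokGo : List Char → List String
  | [] => []
  | c :: rest =>
    if PySem.Chars.isspace c then tokGo rest
    else if c == '{' || c == '}' then String.mk [c] :: tokGo rest
    else if c == '"' then
      String.mk (readStr rest [] false).1 :: tokGo (readStr rest [] false).2
    else
      String.mk (c :: List.takeWhile wordChar rest) :: tokGo (List.dropWhile wordChar rest)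
termination_by l => l.length
decreasing_by
  · simp
  · simp
  · simpa using Nat.lt_succ_of_le (readStr_snd_le rest [] false)
  · simpa using Nat.lt_succ_of_le (List.length_dropWhile_le _ _)

def tokenize_kv (text : String) : List String := tokGo (stripGo text.toList false false)

-- ===== PORT B =====

-- B's `text[i] not in "\r\n"`
def notNLB (c : Char) : Bool := !(c == '\r') && !(c == '\n')

-- B's in-loop update of the stripper's string state (s_in, s_esc)
def stripNext (sIn sEsc : Bool) (c : Char) : Bool × Bool :=
  if sIn then
    if sEsc then (true, false)
    else if c == '\\' then (true, true)
    else if c == '"' then (false, false)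
    else (true, false)
  else ((c == '"'), false)

-- B's single while-loop; state (remaining text, s_in, s_esc, mode, buf, q_esc, word)
def lexGo : List Char → Bool → Bool → Nat → List Char → Bool → List Char → List String
  | [], _, _, mode, buf, _, word =>
    if mode == 1 then [String.mk buf]
    else if mode == 2 then [String.mk word]
    else []
  | c :: rest, sIn, sEsc, mode, buf, qEsc, word =>
    if !sIn && c == '/' && rest.head? == some '/' then
      lexGo (List.dropWhile notNLB rest) sIn sEsc mode buf qEsc word
    else
      let st := stripNext sIn sEsc c
      if mode == 0 then
        if c == '{' || c == '}' then String.mk [c] :: lexGo rest st.1 st.2 0 buf qEsc word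
        else if c == '"' then lexGo rest st.1 st.2 1 [] false word
        else if !PySem.Chars.isspace c then lexGo rest st.1 st.2 2 buf qEsc [c]
        else lexGo rest st.1 st.2 0 buf qEsc word
      else if mode == 1 then
        if qEsc then
          lexGo rest st.1 st.2 1 (buf ++ [if c == 'n' then '\n' else if c == 't' then '\t' else c]) false word
        else if c == '\\' then lexGo rest st.1 st.2 1 buf true word
        else if c == '"' then String.mk buf :: lexGo rest st.1 st.2 0 buf qEsc word
        else lexGo rest st.1 st.2 1 (buf ++ [c]) qEsc word
      else
        if PySem.Chars.isspace c || c == '{' || c == '}' then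
          String.mk word ::
            (if c == '{' || c == '}' then String.mk [c] :: lexGo rest st.1 st.2 0 buf qEsc word
             else lexGo rest st.1 st.2 0 buf qEsc word)
        else lexGo rest st.1 st.2 2 buf qEsc (word ++ [c])
termination_by l _ _ _ _ _ _ => l.length
decreasing_by
  all_goals first
    | (simpa using Nat.lt_succ_of_le (List.length_dropWhile_le _ _))
    | simp

def tokenize_kv_alt (text : String) : List String := lexGo text.toList false false 0 [] false []

-- ===== PRECONDITION & SPEC =====
def Spec_tokenize_kv (text : String) (out : List String) : Prop := out = tokenize_kv_alt text
instance (text : String) (out : List String) : Decidable (Spec_tokenize_kv text out) := by unfold Spec_tokenize_kv; infer_instance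

-- ===== CLAIM (what is proved, stated in full; the proofs are below) =====
def Claim_equal_tokenize_kv : Prop := ∀ (text : String), Dom_tokenize_kv text → Spec_tokenize_kv text (tokenize_kv text)

-- ===== LEMMAS AND PROOFS =====

-- the two ports' newline tests are definitionally the same predicate
theorem notNLB_eq : notNLB = notNL := rfl

-- when in_str is false, strip_comments ignores the incoming esc flag
theorem stripGo_false_esc (l : List Char) (e : Bool) : stripGo l false e = stripGo l false false := by
  cases l <;> simp [stripGo]

-- one pass-through step of strip_comments (no comment starts here)
theorem strip_pass (c : Char) (rest : List Char) (sIn sEsc : Bool)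
    (h : (!sIn && c == '/' && rest.head? == some '/') = false) :
    stripGo (c :: rest) sIn sEsc =
      c :: stripGo rest (stripNext sIn sEsc c).1 (stripNext sIn sEsc c).2 := by
  cases sIn with
  | false =>
    simp only [Bool.not_false, Bool.true_and] at h
    by_cases hq : c = '"'
    · simp [stripGo, stripNext, hq]
    · have hq' : (c == '"') = false := by simp [hq]
      simp [stripGo, stripNext, hq', h]
  | true =>
    simp only [stripGo, stripNext]
    split_ifs <;> simp

-- the simulation invariant: lexGo in mode m computes what tokenize-after-strip computes
-- from the corresponding tokenizer state
theorem main_sim : ∀ (n : Nat) (raw : List Char), raw.length ≤ n →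
    (∀ sIn sEsc buf qEsc word, lexGo raw sIn sEsc 0 buf qEsc word = tokGo (stripGo raw sIn sEsc))
    ∧ (∀ sIn sEsc buf qEsc word, lexGo raw sIn sEsc 1 buf qEsc word =
        String.mk (readStr (stripGo raw sIn sEsc) buf qEsc).1
          :: tokGo (readStr (stripGo raw sIn sEsc) buf qEsc).2)
    ∧ (∀ sIn sEsc buf qEsc word, lexGo raw sIn sEsc 2 buf qEsc word =
        String.mk (word ++ List.takeWhile wordChar (stripGo raw sIn sEsc))
          :: tokGo (List.dropWhile wordChar (stripGo raw sIn sEsc))) := by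
  intro n
  induction n with
  | zero =>
    intro raw h
    have hraw : raw = [] := List.eq_nil_of_length_eq_zero (Nat.le_zero.mp h)
    subst hraw
    refine ⟨fun _ _ _ _ _ => ?_, fun _ _ _ _ _ => ?_, fun _ _ _ _ _ => ?_⟩ <;>
      simp [lexGo, stripGo, tokGo, readStr]
  | succ n ih =>
    intro raw h
    cases raw with
    | nil =>
      refine ⟨fun _ _ _ _ _ => ?_, fun _ _ _ _ _ => ?_, fun _ _ _ _ _ => ?_⟩ <;>
        simp [lexGo, stripGo, tokGo, readStr]
    | cons c rest =>
      have hr : rest.length ≤ n := by simpa using h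
      have hd : (List.dropWhile notNL rest).length ≤ n :=
        le_trans (List.length_dropWhile_le _ _) hr
      obtain ⟨ih0, ih1, ih2⟩ := ih rest hr
      obtain ⟨jh0, jh1, jh2⟩ := ih (List.dropWhile notNL rest) hd
      refine ⟨fun sIn sEsc buf qEsc word => ?_, fun sIn sEsc buf qEsc word => ?_,
              fun sIn sEsc buf qEsc word => ?_⟩ <;>
        by_cases hc : (!sIn && c == '/' && rest.head? == some '/') = true
      -- mode 0, comment
      · simp only [Bool.and_eq_true, Bool.not_eq_true', beq_iff_eq] at hc
        obtain ⟨⟨hsin, hsl⟩, hhd⟩ := hc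
        subst hsin; subst hsl
        rw [show stripGo ('/' :: rest) false sEsc = stripGo (List.dropWhile notNL rest) false false
              from by simp [stripGo, hhd],
            ← stripGo_false_esc (List.dropWhile notNL rest) sEsc]
        simpa [lexGo, hhd, notNLB_eq] using jh0 false sEsc buf qEsc word
      -- mode 0, pass
      · rw [Bool.not_eq_true] at hc
        rw [strip_pass c rest sIn sEsc hc]
        by_cases hb : (c == '{' || c == '}') = true
        · have hb' : c = '{' ∨ c = '}' := by simpa using hb
          have hsp : PySem.Chars.isspace c = false := by
            rcases hb' with hx | hx <;> subst hx <;> decide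
          simp [lexGo, tokGo, hc, hb, hsp, ih0]
        · by_cases hq : c = '"'
          · subst hq
            simp [lexGo, tokGo, hc, ih1, show PySem.Chars.isspace '"' = false from by decide]
          · by_cases hsp : PySem.Chars.isspace c = true
            · simp [lexGo, tokGo, hc, hb, hq, hsp, ih0]
            · rw [Bool.not_eq_true] at hsp
              have hb2 : ¬c = '{' ∧ ¬c = '}' := by simpa using hb
              have hw : wordChar c = true := by simp [wordChar, hsp, hb2.1, hb2.2]
              simp [lexGo, tokGo, hc, hb, hq, hsp, hw, ih2]
      -- mode 1, comment
      · simp only [Bool.and_eq_true, Bool.not_eq_true', beq_iff_eq] at hc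
        obtain ⟨⟨hsin, hsl⟩, hhd⟩ := hc
        subst hsin; subst hsl
        rw [show stripGo ('/' :: rest) false sEsc = stripGo (List.dropWhile notNL rest) false false
              from by simp [stripGo, hhd],
            ← stripGo_false_esc (List.dropWhile notNL rest) sEsc]
        simpa [lexGo, hhd, notNLB_eq] using jh1 false sEsc buf qEsc word
      -- mode 1, pass
      · rw [Bool.not_eq_true] at hc
        rw [strip_pass c rest sIn sEsc hc]
        by_cases hqe : qEsc = true
        · subst hqe
          simp [lexGo, readStr, hc, ih1]
        · rw [Bool.not_eq_true] at hqe
          subst hqe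
          by_cases hbs : c = '\\'
          · subst hbs
            simp [lexGo, readStr, hc, ih1]
          · by_cases hq : c = '"'
            · subst hq
              simp [lexGo, readStr, hc, ih0]
            · simp [lexGo, readStr, hc, hbs, hq, ih1]
      -- mode 2, comment
      · simp only [Bool.and_eq_true, Bool.not_eq_true', beq_iff_eq] at hc
        obtain ⟨⟨hsin, hsl⟩, hhd⟩ := hc
        subst hsin; subst hsl
        rw [show stripGo ('/' :: rest) false sEsc = stripGo (List.dropWhile notNL rest) false false
              from by simp [stripGo, hhd],
            ← stripGo_false_esc (List.dropWhile notNL rest) sEsc]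
        simpa [lexGo, hhd, notNLB_eq] using jh2 false sEsc buf qEsc word
      -- mode 2, pass
      · rw [Bool.not_eq_true] at hc
        rw [strip_pass c rest sIn sEsc hc]
        by_cases hw : wordChar c = true
        · have hw' : (PySem.Chars.isspace c = false ∧ ¬c = '{') ∧ ¬c = '}' := by
            simpa [wordChar] using hw
          rw [List.takeWhile_cons_of_pos hw, List.dropWhile_cons_of_pos hw]
          simp [lexGo, hc, hw'.1.1, hw'.1.2, hw'.2, ih2]
        · have hwf : wordChar c = false := Bool.not_eq_true _ ▸ (by simpa using hw)
          rw [List.takeWhile_cons_of_neg hw, List.dropWhile_cons_of_neg hw]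
          by_cases hsp : PySem.Chars.isspace c = true
          · have hbr : (c == '{' || c == '}') = false := by
              by_contra hx
              rw [Bool.not_eq_false] at hx
              have hb' : c = '{' ∨ c = '}' := by simpa using hx
              rcases hb' with hy | hy <;> subst hy <;> exact absurd hsp (by decide)
            simp [lexGo, tokGo, hc, hsp, hbr, ih0]
          · rw [Bool.not_eq_true] at hsp
            have hb' : c = '{' ∨ c = '}' := by
              by_contra hx
              simp only [not_or] at hx
              exact hw (by simp [wordChar, hsp, hx.1, hx.2])
            have hbr : (c == '{' || c == '}') = true := by simpa using hb'
            have hq : (c == '"') = false := by rcases hb' with hx | hx <;> subst hx <;> decide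
            simp [lexGo, tokGo, hc, hsp, hbr, hq, ih0]

-- ===== VERDICT (by name: the statement is the Claim_ definition above) =====
theorem tokenize_kv_spec : Claim_equal_tokenize_kv := by
  intro text _
  unfold Spec_tokenize_kv tokenize_kv tokenize_kv_alt
  exact ((main_sim text.toList.length text.toList le_rfl).1 false false [] false []).symm
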